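-- pv_equiv track=rewrite | github.com/PPinto22/LeetCode | kickstart/2020 Round D/b.py | solve
-- ===== SOURCE A (Python) =====
-- def solve(n, notes):
--     unique_notes = [notes[i] for i in range(n) if i == 0 or notes[i-1] != notes[i]]
--     m = len(unique_notes)
--     up = down = violations = 0
--     for i in range(1, m):
--         if unique_notes[i] > unique_notes[i-1]:
--             up += 1
--             down = 0
--         else:
--             down += 1
--             up = 0
--         if up == 4 or down == 4:
--             violations += 1
--             up = down = 0
--     return violations
-- ===== SOURCE B (Python) =====
-- def solve(n, notes):
--     # Loop-free staged pipeline: dedup adjacent duplicates, list the up/down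
--     # directions, find the direction-change indices, and sum (j-i)//4 over
--     # consecutive change points (each maximal monotone run of L moves holds
--     # L//4 violations).
--     u = notes[:n]
--     unique = u[:1] + [b for a, b in zip(u, u[1:]) if a != b]
--     dirs = [a < b for a, b in zip(unique, unique[1:])]
--     cuts = [0] + [i for i in range(1, len(dirs)) if dirs[i] != dirs[i - 1]] + [len(dirs)]
--     return sum((j - i) // 4 for i, j in zip(cuts, cuts[1:]))
-- ===== Notes on version B (the rewrite author's own statement) =====
-- stated objective: alternative
-- what changed: A runs one stateful loop with up/down counters that reset at 4; B is a loop-free staged pipeline: dedup adjacent duplicates via zip-filter, build the direction list, list the direction-change indices, and sum (j-i)//4 over consecutive change points.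
-- outside the precondition, e.g. on solve(3, [1, 2]): A raises IndexError, B returns 0; on solve(-1, [1, 2, 3, 4, 5, 6]): A returns 0, B returns 1
import Mathlib
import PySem

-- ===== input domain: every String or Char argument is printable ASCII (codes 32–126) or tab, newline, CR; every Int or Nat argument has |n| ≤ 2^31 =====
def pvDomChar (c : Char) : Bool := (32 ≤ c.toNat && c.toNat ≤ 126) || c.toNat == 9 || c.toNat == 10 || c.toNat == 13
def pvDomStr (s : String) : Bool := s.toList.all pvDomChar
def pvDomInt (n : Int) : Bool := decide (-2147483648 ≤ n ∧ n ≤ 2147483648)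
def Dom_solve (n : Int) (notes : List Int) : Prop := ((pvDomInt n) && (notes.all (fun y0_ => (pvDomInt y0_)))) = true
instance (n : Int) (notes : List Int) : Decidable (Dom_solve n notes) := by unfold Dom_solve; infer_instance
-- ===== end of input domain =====

-- B replaces A's stateful loop with reset-at-4 up/down counters by a loop-free staged
-- pipeline: zip-filter dedup, a direction list, the direction-change indices, and the sum
-- of (j - i) // 4 over consecutive change points (objective: alternative, same cost).

-- ===== PORT A =====
def solve (n : Int) (notes : List Int) : Int :=
  let unique_notes : List Int :=
    ((PySem.List.pyRange 0 n 1).filter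
      (fun i => (i == 0) || (PySem.List.pyGetD notes (i - 1) 0 != PySem.List.pyGetD notes i 0))).map
      (fun i => PySem.List.pyGetD notes i 0)
  let m : Int := unique_notes.length
  let r := (PySem.List.pyRange 1 m 1).foldl
    (fun (st : Int × Int × Int) i =>
      let ud :=
        if PySem.List.pyGetD unique_notes i 0 > PySem.List.pyGetD unique_notes (i - 1) 0
        then (st.1 + 1, 0) else (0, st.2.1 + 1)
      if ud.1 == 4 || ud.2 == 4 then (0, 0, st.2.2 + 1) else (ud.1, ud.2, st.2.2))
    (0, 0, 0)
  r.2.2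

-- ===== PORT B =====
def solve_alt (n : Int) (notes : List Int) : Int :=
  let u := PySem.List.slice notes none (some n)
  let unique := PySem.List.slice u none (some 1) ++
    ((u.zip (PySem.List.slice u (some 1) none)).filter (fun ab => ab.1 != ab.2)).map Prod.snd
  let dirs := (unique.zip (PySem.List.slice unique (some 1) none)).map
    (fun ab => decide (ab.1 < ab.2))
  let cuts := [(0 : Int)] ++
    (PySem.List.pyRange 1 (dirs.length : Int) 1).filter
      (fun i => PySem.List.pyGetD dirs i false != PySem.List.pyGetD dirs (i - 1) false) ++
    [(dirs.length : Int)]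
  ((cuts.zip (PySem.List.slice cuts (some 1) none)).map
    (fun ij => PySem.Int.floordiv (ij.2 - ij.1) 4)).sum

-- ===== PRECONDITION & SPEC =====
-- Pre_ excludes n > len(notes), where A raises IndexError, and negative n (outside the
-- natural domain of a note count), where A returns 0 but B's slice notes[:n] counts from the end.
def Pre_solve (n : Int) (notes : List Int) : Prop := 0 ≤ n ∧ n ≤ (notes.length : Int)
instance (n : Int) (notes : List Int) : Decidable (Pre_solve n notes) := by unfold Pre_solve; infer_instance
def pvWitness_solve : Int × List Int := (3, [1, 2, 3])

def Spec_solve (n : Int) (notes : List Int) (out : Int) : Prop := out = solve_alt n notes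
instance (n : Int) (notes : List Int) (out : Int) : Decidable (Spec_solve n notes out) := by unfold Spec_solve; infer_instance

-- ===== CLAIM (what is proved, stated in full; the proofs are below) =====
def Claim_equal_solve : Prop := ∀ (n : Int) (notes : List Int), Dom_solve n notes → Pre_solve n notes → Spec_solve n notes (solve n notes)

-- ===== LEMMAS AND PROOFS =====

-- proof-side helpers: adjacent dedup and A's loop
def dedT : Int → List Int → List Int
  | _, [] => []
  | p, y :: ys => if y = p then dedT p ys else y :: dedT y ys

def ded : List Int → List Int
  | [] => []
  | x :: xs => x :: dedT x xs

def stepA (st : Int × Int × Int) (a b : Int) : Int × Int × Int :=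
  let ud := if b > a then (st.1 + 1, 0) else (0, st.2.1 + 1)
  if ud.1 == 4 || ud.2 == 4 then (0, 0, st.2.2 + 1) else (ud.1, ud.2, st.2.2)

def loopA : Int → Int → Int → Int → List Int → Int
  | _, _, _, v, [] => v
  | p, u, d, v, y :: ys =>
    let s := stepA (u, d, v) p y
    loopA y s.1 s.2.1 s.2.2 ys

-- intermediate run-length pass used only in the proofs
def loopB : Int → Option Bool → Int → Int → List Int → Int
  | _, _, s, v, [] => v + PySem.Int.floordiv s 4
  | p, dir, s, v, y :: ys =>
    if y = p then loopB p dir s v ys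
    else if some (decide (y > p)) = dir then loopB y dir (s + 1) v ys
    else loopB y (some (decide (y > p))) 1 (v + PySem.Int.floordiv s 4) ys

def ChainNe : Int → List Int → Prop
  | _, [] => True
  | p, y :: ys => y ≠ p ∧ ChainNe y ys

-- B-side proof helpers: directions, runs, change points, pair sums
def zipDirs : Int → List Int → List Bool
  | _, [] => []
  | p, y :: ys => decide (p < y) :: zipDirs y ys

def runs : Bool → Int → List Bool → Int
  | _, s, [] => PySem.Int.floordiv s 4
  | d, s, b :: bs => if b = d then runs d (s + 1) bs else PySem.Int.floordiv s 4 + runs b 1 bs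

def sumRuns : List Bool → Int
  | [] => 0
  | b :: bs => runs b 1 bs

def chgFrom : Int → Bool → List Bool → List Int
  | _, _, [] => []
  | i, d, b :: bs => if b = d then chgFrom (i + 1) d bs else i :: chgFrom (i + 1) b bs

def pairSum : List Int → Int
  | c :: c' :: rest => PySem.Int.floordiv (c' - c) 4 + pairSum (c' :: rest)
  | _ => 0

def pairFold {σ : Type} (f : σ → Int → Int → σ) (init : σ) : List Int → σ
  | [] => init
  | [_] => init
  | a :: b :: t => pairFold f (f init a b) (b :: t)

lemma foldl_congr' {σ α : Type} (l : List α) (f g : σ → α → σ)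
    (h : ∀ st x, x ∈ l → f st x = g st x) : ∀ init, l.foldl f init = l.foldl g init := by
  induction l with
  | nil => intro init; rfl
  | cons a t ih =>
    intro init
    simp only [List.foldl_cons]
    rw [h init a (by simp)]
    exact ih (fun st x hx => h st x (by simp [hx])) _

lemma range_pairs {σ : Type} (f : σ → Int → Int → σ) :
    ∀ (U : List Int) (init : σ),
      (List.range (U.length - 1)).foldl (fun st k => f st (U.getD k 0) (U.getD (k + 1) 0)) init
        = pairFold f init U := by
  intro U
  induction U with
  | nil => intro init; rfl
  | cons a t ih =>
    intro init
    cases t with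
    | nil => rfl
    | cons b t' =>
      rw [show (a :: b :: t').length - 1 = ((b :: t').length - 1) + 1 by simp,
        List.range_succ_eq_map]
      simp only [List.foldl_cons, List.foldl_map, List.getD_cons_zero, List.getD_cons_succ]
      exact ih (f init a b)

lemma idx_to_pairs {σ : Type} (f : σ → Int → Int → σ) (U : List Int) (init : σ) :
    (PySem.List.pyRange 1 (U.length : Int) 1).foldl
      (fun st i => f st (PySem.List.pyGetD U (i - 1) 0) (PySem.List.pyGetD U i 0)) init
      = pairFold f init U := by
  rw [PySem.List.pyRange_one]
  rw [show ((U.length : Int) - 1).toNat = U.length - 1 by omega]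
  rw [List.foldl_map]
  rw [foldl_congr' _ _ (fun st k => f st (U.getD k 0) (U.getD (k + 1) 0))
    (by
      intro st k _
      have h1 : (1 : Int) + (k : Int) - 1 = ((k : Nat) : Int) := by omega
      have h2 : (1 : Int) + (k : Int) = (((k + 1 : Nat)) : Int) := by push_cast; omega
      rw [h1, h2, PySem.List.pyGetD_natCast, PySem.List.pyGetD_natCast])]
  exact range_pairs f U init

lemma pairs_loopA : ∀ (t : List Int) (h u d v : Int),
    (pairFold stepA (u, d, v) (h :: t)).2.2 = loopA h u d v t := by
  intro t
  induction t with
  | nil => intro h u d v; rfl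
  | cons y ys ih =>
    intro h u d v
    show (pairFold stepA (stepA (u, d, v) h y) (y :: ys)).2.2 = _
    rw [show stepA (u, d, v) h y
        = ((stepA (u, d, v) h y).1, (stepA (u, d, v) h y).2.1, (stepA (u, d, v) h y).2.2) by rfl]
    rw [ih]
    rfl

lemma getD_lt (l : List Int) (i : Nat) (h : i < l.length) : l.getD i 0 = l[i] := by
  simp [List.getD_eq_getElem?_getD, List.getElem?_eq_getElem h]

lemma lastTake (notes : List Int) (k : Nat) (hk : k < notes.length) :
    (notes.take (k + 1)).getLastD 0 = notes[k] := by
  rw [List.take_succ, List.getElem?_eq_getElem hk, Option.toList_some]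
  exact List.getLastD_concat

lemma dedT_append : ∀ (ys : List Int) (p x : Int),
    dedT p (ys ++ [x]) = dedT p ys ++ (if x = ys.getLastD p then [] else [x]) := by
  intro ys
  induction ys with
  | nil =>
    intro p x
    simp only [List.nil_append, dedT, List.getLastD_nil]
    by_cases h : x = p <;> simp [h]
  | cons y t ih =>
    intro p x
    simp only [List.cons_append, dedT, List.getLastD_cons]
    by_cases h : y = p <;> simp [h, ih]

lemma ded_snoc (zs : List Int) (x : Int) (h : zs ≠ []) :
    ded (zs ++ [x]) = ded zs ++ (if x = zs.getLastD 0 then [] else [x]) := by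
  cases zs with
  | nil => cases h rfl
  | cons z t => simp only [List.cons_append, ded, dedT_append, List.getLastD_cons]

lemma dedT_chain : ∀ (ys : List Int) (p : Int), ChainNe p (dedT p ys) := by
  intro ys
  induction ys with
  | nil => intro p; exact trivial
  | cons y t ih =>
    intro p
    by_cases h : y = p
    · simpa [dedT, h] using ih p
    · simp only [dedT, if_neg h, ChainNe]
      exact ⟨h, ih y⟩

lemma ded_chain (u : List Int) (h : Int) (t : List Int) (hU : ded u = h :: t) :
    ChainNe h t := by
  cases u with
  | nil => cases hU
  | cons x xs =>
    simp only [ded] at hU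
    have h1 : x = h := by injection hU
    have h2 : dedT x xs = t := by injection hU
    subst h1; subst h2
    exact dedT_chain xs x

-- the core invariant: reset-at-4 counters versus run length s with floor division
lemma main_inv : ∀ (ys : List Int) (p : Int) (dir : Option Bool) (s v : Int),
    0 ≤ s → (dir = none → s = 0) → ChainNe p ys →
    loopA p (if dir = some true then s % 4 else 0) (if dir = some false then s % 4 else 0)
      (v + PySem.Int.floordiv s 4) ys = loopB p dir s v ys := by
  intro ys
  induction ys with
  | nil => intro p dir s v _ _ _; rfl
  | cons y t ih =>
    intro p dir s v hs hnone hch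
    obtain ⟨hyp, hch⟩ := hch
    have hfd : PySem.Int.floordiv s 4 = s / 4 := PySem.Int.floordiv_eq_ediv_of_pos (by omega)
    have hfd1 : PySem.Int.floordiv (1 : Int) 4 = 0 := by decide
    by_cases hd : some (decide (y > p)) = dir
    · -- same direction: the streak extends by one
      have hfds : PySem.Int.floordiv (s + 1) 4 = (s + 1) / 4 :=
        PySem.Int.floordiv_eq_ediv_of_pos (by omega)
      rw [show loopB p dir s v (y :: t) = loopB y dir (s + 1) v t by
        simp [loopB, hyp, hd]]
      rw [← ih y dir (s + 1) v (by omega) (by intro h; rw [h] at hd; cases hd) hch]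
      by_cases hlt : p < y
      · have hdir : dir = some true := by rw [← hd]; simp [hlt]
        subst hdir
        simp only [Option.some.injEq, reduceIte, reduceCtorEq, if_false, Bool.true_eq_false]
        rw [hfd, hfds]
        have hstep : stepA (s % 4, 0, v + s / 4) p y = ((s + 1) % 4, 0, v + (s + 1) / 4) := by
          simp only [stepA, gt_iff_lt, if_pos hlt]
          by_cases h4 : s % 4 + 1 = 4
          · rw [if_pos (by simp [h4])]
            rw [show (s + 1) % 4 = 0 by omega, show v + (s + 1) / 4 = v + s / 4 + 1 by omega]
          · rw [if_neg (by simp; omega)]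
            rw [show (s + 1) % 4 = s % 4 + 1 by omega, show v + (s + 1) / 4 = v + s / 4 by omega]
        rw [loopA, hstep]
      · have hdir : dir = some false := by rw [← hd]; simp [hlt]
        subst hdir
        simp only [Option.some.injEq, reduceIte, reduceCtorEq, if_false, Bool.false_eq_true]
        rw [hfd, hfds]
        have hstep : stepA (0, s % 4, v + s / 4) p y = (0, (s + 1) % 4, v + (s + 1) / 4) := by
          simp only [stepA, gt_iff_lt, if_neg hlt]
          by_cases h4 : s % 4 + 1 = 4
          · rw [if_pos (by simp [h4])]
            rw [show (s + 1) % 4 = 0 by omega, show v + (s + 1) / 4 = v + s / 4 + 1 by omega]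
          · rw [if_neg (by simp; omega)]
            rw [show (s + 1) % 4 = s % 4 + 1 by omega, show v + (s + 1) / 4 = v + s / 4 by omega]
        rw [loopA, hstep]
    · -- direction change (or very first move): flush the streak, start a run of length 1
      rw [show loopB p dir s v (y :: t) =
          loopB y (some (decide (y > p))) 1 (v + PySem.Int.floordiv s 4) t by
        simp [loopB, hyp, hd]]
      rw [← ih y (some (decide (y > p))) 1 (v + PySem.Int.floordiv s 4) (by omega)
        (by intro h; cases h) hch]
      by_cases hlt : p < y
      · have hu : ¬ (dir = some true) := fun h => hd (by simp [h, hlt])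
        rw [if_neg hu]
        have hstep : ∀ D V, stepA (0, D, V) p y = (1, 0, V) := by
          intro D V; simp [stepA, hlt]
        rw [loopA, hstep]
        simp [hlt, hfd1]
      · have hu : ¬ (dir = some false) := fun h => hd (by simp [h, hlt])
        rw [if_neg hu]
        have hstep : ∀ U V, stepA (U, 0, V) p y = (0, 1, V) := by
          intro U V; simp [stepA, hlt]
        rw [loopA, hstep]
        simp [hlt, hfd1]

-- A's comprehension over Int indices, in Nat form
lemma A_comp (notes : List Int) (n : Int) :
    ((PySem.List.pyRange 0 n 1).filter
        (fun i => (i == 0) || (PySem.List.pyGetD notes (i - 1) 0 != PySem.List.pyGetD notes i 0))).map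
      (fun i => PySem.List.pyGetD notes i 0)
    = ((List.range n.toNat).filter
        (fun j => (j == 0) || !(notes.getD (j - 1) 0 == notes.getD j 0))).map
      (fun j => notes.getD j 0) := by
  rw [PySem.List.pyRange_one, show (n - 0 : Int) = n from sub_zero n,
    List.filter_map, List.map_map]
  have hmap : ((fun i => PySem.List.pyGetD notes i 0) ∘ (fun k : Nat => (0 : Int) + (k : Int)))
      = (fun j : Nat => notes.getD j 0) := by
    funext j
    simp [PySem.List.pyGetD_natCast]
  have hfilt : ((fun i => (i == 0) ||
        (PySem.List.pyGetD notes (i - 1) 0 != PySem.List.pyGetD notes i 0))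
        ∘ (fun k : Nat => (0 : Int) + (k : Int)))
      = (fun j : Nat => (j == 0) || !(notes.getD (j - 1) 0 == notes.getD j 0)) := by
    funext j
    cases j with
    | zero => simp
    | succ j' =>
      simp only [Function.comp_apply]
      rw [zero_add]
      rw [show ((j' + 1 : Nat) : Int) - 1 = (j' : Int) by push_cast; ring]
      rw [PySem.List.pyGetD_natCast, PySem.List.pyGetD_natCast]
      have hz : (((j' + 1 : Nat) : Int) == 0) = false := by
        rw [beq_eq_false_iff_ne]
        push_cast
        omega
      have hz2 : ((j' + 1 : Nat) == 0) = false := by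
        rw [beq_eq_false_iff_ne]
        omega
      rw [hz, hz2, Bool.false_or, Bool.false_or, Nat.add_sub_cancel]
      rfl
  rw [hmap, hfilt]

-- A's comprehension equals adjacent dedup of the first k notes
lemma A_ded (notes : List Int) : ∀ (k : Nat), k ≤ notes.length →
    ((List.range k).filter
        (fun j => (j == 0) || !(notes.getD (j - 1) 0 == notes.getD j 0))).map
      (fun j => notes.getD j 0)
    = ded (notes.take k) := by
  intro k
  induction k with
  | zero => intro _; rfl
  | succ k ihk =>
    intro hk1
    have hk : k < notes.length := by omega
    rw [List.range_succ, List.filter_append, List.map_append, ihk (by omega)]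
    rw [List.take_succ, List.getElem?_eq_getElem hk, Option.toList_some]
    cases k with
    | zero =>
      simp [ded, dedT, List.getElem?_eq_getElem hk]
    | succ k' =>
      have hk' : k' < notes.length := by omega
      have hne : notes.take (k' + 1) ≠ [] := by
        apply List.ne_nil_of_length_pos
        rw [List.length_take]
        omega
      rw [ded_snoc _ _ hne, lastTake notes k' hk']
      congr 1
      by_cases heq : notes[k'] = notes[k' + 1]
      · have hp : (((k' + 1 : Nat) == 0) || !(notes.getD (k' + 1 - 1) 0 == notes.getD (k' + 1) 0)) = false := by
          rw [Nat.add_sub_cancel, getD_lt notes k' hk', getD_lt notes (k' + 1) hk]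
          simp [heq]
        rw [show List.filter (fun j => (j == 0) || !(notes.getD (j - 1) 0 == notes.getD j 0))
            [k' + 1] = [] by rw [List.filter_singleton, hp]; rfl]
        rw [if_pos heq.symm]
        rfl
      · have hp : (((k' + 1 : Nat) == 0) || !(notes.getD (k' + 1 - 1) 0 == notes.getD (k' + 1) 0)) = true := by
          rw [Nat.add_sub_cancel, getD_lt notes k' hk', getD_lt notes (k' + 1) hk]
          simp [heq]
        rw [show List.filter (fun j => (j == 0) || !(notes.getD (j - 1) 0 == notes.getD j 0))
            [k' + 1] = [k' + 1] by rw [List.filter_singleton, hp]; rfl]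
        rw [if_neg (fun h => heq h.symm)]
        simp [List.getElem?_eq_getElem hk]

lemma solve_eq_loopA (n : Int) (notes : List Int) (hpre : n ≤ (notes.length : Int)) :
    solve n notes = (match ded (notes.take n.toNat) with
      | [] => 0
      | h :: t => loopA h 0 0 0 t) := by
  simp only [solve]
  rw [A_comp, A_ded notes n.toNat (by omega)]
  show ((PySem.List.pyRange 1 ((ded (notes.take n.toNat)).length : Int) 1).foldl
      (fun st i => stepA st (PySem.List.pyGetD (ded (notes.take n.toNat)) (i - 1) 0)
        (PySem.List.pyGetD (ded (notes.take n.toNat)) i 0)) (0, 0, 0)).2.2 = _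
  rw [idx_to_pairs stepA (ded (notes.take n.toNat)) ((0 : Int), (0 : Int), (0 : Int))]
  cases hU : ded (notes.take n.toNat) with
  | nil => rfl
  | cons h t => exact pairs_loopA t h 0 0 0

-- ===== B-side lemmas =====

lemma getD_drop (l : List Bool) (c k : Nat) :
    (l.drop c).getD k false = l.getD (c + k) false := by
  simp [List.getD_eq_getElem?_getD, List.getElem?_drop]

lemma zip_dedT : ∀ (xs : List Int) (p : Int),
    (((p :: xs).zip xs).filter (fun ab => ab.1 != ab.2)).map Prod.snd = dedT p xs := by
  intro xs
  induction xs with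
  | nil => intro p; rfl
  | cons y ys ih =>
    intro p
    show ((((p, y) :: (y :: ys).zip ys)).filter (fun ab => ab.1 != ab.2)).map Prod.snd = _
    by_cases h : y = p
    · rw [List.filter_cons_of_neg (by simp [h])]
      rw [ih y]
      simp [dedT, h]
    · rw [List.filter_cons_of_pos (by simp; exact fun he => h he.symm)]
      rw [List.map_cons, ih y]
      simp [dedT, h]

lemma unique_eq (u : List Int) :
    PySem.List.slice u none (some 1) ++
      ((u.zip (PySem.List.slice u (some 1) none)).filter (fun ab => ab.1 != ab.2)).map Prod.snd
    = ded u := by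
  rw [PySem.List.slice_from_one]
  rw [show (some (1 : Int)) = some ((1 : Nat) : Int) by norm_num, PySem.List.slice_to_natCast]
  cases u with
  | nil => rfl
  | cons x xs =>
    show [x] ++ (((x :: xs).zip xs).filter (fun ab => ab.1 != ab.2)).map Prod.snd = _
    rw [zip_dedT xs x]
    rfl

lemma zip_dirs : ∀ (t : List Int) (h : Int),
    (((h :: t).zip t).map (fun ab => decide (ab.1 < ab.2))) = zipDirs h t := by
  intro t
  induction t with
  | nil => intro h; rfl
  | cons y ys ih =>
    intro h
    show (((h, y) :: (y :: ys).zip ys).map (fun ab => decide (ab.1 < ab.2))) = _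
    rw [List.map_cons, ih y]
    rfl

lemma pairSum_zip : ∀ (l : List Int),
    ((l.zip (l.drop 1)).map (fun ij => PySem.Int.floordiv (ij.2 - ij.1) 4)).sum = pairSum l := by
  intro l
  induction l with
  | nil => rfl
  | cons c t ih =>
    cases t with
    | nil => rfl
    | cons c' rest =>
      show (((c, c') :: ((c' :: rest).zip rest)).map
        (fun ij => PySem.Int.floordiv (ij.2 - ij.1) 4)).sum = _
      rw [List.map_cons, List.sum_cons]
      rw [show (c' :: rest).zip rest = (c' :: rest).zip ((c' :: rest).drop 1) from rfl, ih]
      rfl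

lemma chg_filter : ∀ (bs : List Bool) (d : Bool) (c : Nat) (D : List Bool),
    D.drop c = d :: bs →
    ((List.range bs.length).map (fun k : Nat => ((c + 1 + k : Nat) : Int))).filter
        (fun i => PySem.List.pyGetD D i false != PySem.List.pyGetD D (i - 1) false)
      = chgFrom ((c + 1 : Nat) : Int) d bs := by
  intro bs
  induction bs with
  | nil => intro d c D _; rfl
  | cons b bs ih =>
    intro d c D hD
    have hgd : ∀ k : Nat, D.getD (c + k) false = (d :: b :: bs).getD k false := by
      intro k; rw [← hD, getD_drop]
    have hDc1 : D.drop (c + 1) = b :: bs := by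
      rw [← List.drop_drop, hD]
      rfl
    rw [show (b :: bs).length = bs.length + 1 from rfl, List.range_succ_eq_map,
      List.map_cons, List.map_map]
    have hpred : (PySem.List.pyGetD D ((c + 1 + 0 : Nat) : Int) false
        != PySem.List.pyGetD D (((c + 1 + 0 : Nat) : Int) - 1) false) = (b != d) := by
      rw [show (((c + 1 + 0 : Nat) : Int) - 1) = ((c : Nat) : Int) by push_cast; ring]
      rw [PySem.List.pyGetD_natCast, PySem.List.pyGetD_natCast]
      rw [show c + 1 + 0 = c + 1 from rfl, hgd 1, show c = c + 0 from rfl, hgd 0]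
      rfl
    have htail : ((List.range bs.length).map
          ((fun k : Nat => ((c + 1 + k : Nat) : Int)) ∘ (fun k => k + 1))).filter
          (fun i => PySem.List.pyGetD D i false != PySem.List.pyGetD D (i - 1) false)
        = chgFrom (((c + 1) + 1 : Nat) : Int) b bs := by
      rw [show ((fun k : Nat => ((c + 1 + k : Nat) : Int)) ∘ (fun k => k + 1))
          = (fun k : Nat => (((c + 1) + 1 + k : Nat) : Int)) by
        funext k; simp only [Function.comp_apply]; push_cast; ring]
      exact ih b (c + 1) D hDc1
    by_cases hbd : b = d
    · rw [List.filter_cons_of_neg (by rw [hpred]; simp [hbd])]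
      rw [htail]
      simp [chgFrom, hbd]
      all_goals (push_cast; ring)
    · rw [List.filter_cons_of_pos (by rw [hpred]; simp [hbd])]
      rw [htail]
      simp [chgFrom, hbd]
      all_goals (push_cast; ring)

lemma pairSum_chg : ∀ (bs : List Bool) (d : Bool) (c i : Int),
    pairSum (c :: chgFrom i d bs ++ [i + (bs.length : Int)]) = runs d (i - c) bs := by
  intro bs
  induction bs with
  | nil =>
    intro d c i
    show pairSum [c, i + ((0 : Nat) : Int)] = PySem.Int.floordiv (i - c) 4
    norm_num [pairSum]
  | cons b bs ih =>
    intro d c i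
    have hlen : i + (((b :: bs).length : Nat) : Int) = (i + 1) + (bs.length : Int) := by
      push_cast [List.length_cons]; ring
    by_cases hbd : b = d
    · subst hbd
      rw [show chgFrom i b (b :: bs) = chgFrom (i + 1) b bs by simp [chgFrom]]
      rw [hlen, ih b c (i + 1)]
      rw [show runs b (i - c) (b :: bs) = runs b (i - c + 1) bs by simp [runs]]
      have : i + 1 - c = i - c + 1 := by ring
      rw [this]
    · rw [show chgFrom i d (b :: bs) = i :: chgFrom (i + 1) b bs by simp [chgFrom, hbd]]
      rw [show (c :: (i :: chgFrom (i + 1) b bs) ++ [i + (((b :: bs).length : Nat) : Int)])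
          = c :: i :: (chgFrom (i + 1) b bs ++ [i + (((b :: bs).length : Nat) : Int)]) by simp]
      rw [show pairSum (c :: i :: (chgFrom (i + 1) b bs ++ [i + (((b :: bs).length : Nat) : Int)]))
          = PySem.Int.floordiv (i - c) 4
            + pairSum (i :: (chgFrom (i + 1) b bs ++ [i + (((b :: bs).length : Nat) : Int)])) by
        cases hx : chgFrom (i + 1) b bs ++ [i + (((b :: bs).length : Nat) : Int)] with
        | nil => exact absurd hx (by simp)
        | cons z zs => rfl]
      rw [hlen, show (i : Int) :: (chgFrom (i + 1) b bs ++ [(i + 1) + (bs.length : Int)])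
          = i :: chgFrom (i + 1) b bs ++ [(i + 1) + (bs.length : Int)] by simp]
      rw [ih b i (i + 1)]
      rw [show runs d (i - c) (b :: bs)
          = PySem.Int.floordiv (i - c) 4 + runs b 1 bs by simp [runs, hbd]]
      norm_num

lemma loopB_runs : ∀ (ys : List Int) (p : Int) (d : Bool) (s v : Int),
    ChainNe p ys → loopB p (some d) s v ys = v + runs d s (zipDirs p ys) := by
  intro ys
  induction ys with
  | nil => intro p d s v _; rfl
  | cons y t ih =>
    intro p d s v hch
    obtain ⟨hyp, hch⟩ := hch
    have hdec : decide (y > p) = decide (p < y) := by simp [gt_iff_lt]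
    by_cases hb : decide (p < y) = d
    · rw [show loopB p (some d) s v (y :: t) = loopB y (some d) (s + 1) v t by
        simp [loopB, hyp, hdec, hb]]
      rw [ih y d (s + 1) v hch]
      rw [show zipDirs p (y :: t) = decide (p < y) :: zipDirs y t from rfl]
      rw [show runs d s (decide (p < y) :: zipDirs y t) = runs d (s + 1) (zipDirs y t) by
        simp [runs, hb]]
    · rw [show loopB p (some d) s v (y :: t)
          = loopB y (some (decide (y > p))) 1 (v + PySem.Int.floordiv s 4) t by
        simp [loopB, hyp, hdec, hb]]
      rw [hdec, ih y (decide (p < y)) 1 (v + PySem.Int.floordiv s 4) hch]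
      rw [show zipDirs p (y :: t) = decide (p < y) :: zipDirs y t from rfl]
      rw [show runs d s (decide (p < y) :: zipDirs y t)
          = PySem.Int.floordiv s 4 + runs (decide (p < y)) 1 (zipDirs y t) by
        simp [runs, hb]]
      ring

lemma loopB_start (h : Int) (t : List Int) (hch : ChainNe h t) :
    loopB h none 0 0 t = sumRuns (zipDirs h t) := by
  cases t with
  | nil => rfl
  | cons y ys =>
    obtain ⟨hy, hch'⟩ := hch
    have hdec : decide (y > h) = decide (h < y) := by simp [gt_iff_lt]
    rw [show loopB h none 0 0 (y :: ys)
        = loopB y (some (decide (y > h))) 1 (0 + PySem.Int.floordiv 0 4) ys by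
      simp [loopB, hy]]
    rw [hdec, loopB_runs ys y (decide (h < y)) 1 (0 + PySem.Int.floordiv 0 4) hch']
    rw [show (0 : Int) + PySem.Int.floordiv 0 4 = 0 by decide]
    rw [show zipDirs h (y :: ys) = decide (h < y) :: zipDirs y ys from rfl]
    rw [show sumRuns (decide (h < y) :: zipDirs y ys)
        = runs (decide (h < y)) 1 (zipDirs y ys) from rfl]
    ring

lemma solve_alt_eq (n : Int) (notes : List Int) (hn0 : 0 ≤ n) :
    solve_alt n notes = (match ded (notes.take n.toNat) with
      | [] => 0
      | h :: t => sumRuns (zipDirs h t)) := by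
  simp only [solve_alt]
  rw [PySem.List.slice_to notes hn0, unique_eq]
  cases hU : ded (notes.take n.toNat) with
  | nil => decide
  | cons h t =>
    rw [PySem.List.slice_from_one]
    rw [show (h :: t).tail = t from rfl, zip_dirs t h]
    show _ = sumRuns (zipDirs h t)
    cases hD : zipDirs h t with
    | nil =>
      rw [PySem.List.slice_from_one]
      decide
    | cons d bs =>
      rw [show ((d :: bs).length : Int) = (((bs.length + 1 : Nat)) : Int) by
        push_cast [List.length_cons]; ring]
      rw [PySem.List.pyRange_one]
      rw [show ((((bs.length + 1 : Nat)) : Int) - 1).toNat = bs.length by omega]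
      rw [List.filter_map]
      rw [show ((fun i => PySem.List.pyGetD (d :: bs) i false
            != PySem.List.pyGetD (d :: bs) (i - 1) false) ∘ (fun k : Nat => (1 : Int) + (k : Int)))
          = (fun k : Nat => PySem.List.pyGetD (d :: bs) ((0 + 1 + k : Nat) : Int) false
            != PySem.List.pyGetD (d :: bs) (((0 + 1 + k : Nat) : Int) - 1) false) by
        funext k; simp only [Function.comp_apply]; congr 2 <;> (push_cast; ring)]
      rw [show (fun k : Nat => PySem.List.pyGetD (d :: bs) ((0 + 1 + k : Nat) : Int) false
            != PySem.List.pyGetD (d :: bs) (((0 + 1 + k : Nat) : Int) - 1) false)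
          = (fun i => PySem.List.pyGetD (d :: bs) i false
            != PySem.List.pyGetD (d :: bs) (i - 1) false) ∘ (fun k : Nat => ((0 + 1 + k : Nat) : Int)) from rfl]
      rw [show (fun k : Nat => (1 : Int) + (k : Int)) = (fun k : Nat => ((0 + 1 + k : Nat) : Int)) by
        funext k; push_cast; ring]
      rw [← List.filter_map]
      rw [chg_filter bs d 0 (d :: bs) (by rfl)]
      rw [PySem.List.slice_from_one]
      have hcuts : ([(0 : Int)] ++ chgFrom ((0 + 1 : Nat) : Int) d bs
            ++ [(((bs.length + 1 : Nat)) : Int)])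
          = (0 : Int) :: (chgFrom 1 d bs ++ [1 + (bs.length : Int)]) := by
        have h1 : ((0 + 1 : Nat) : Int) = 1 := by norm_num
        have h2 : (((bs.length + 1 : Nat)) : Int) = 1 + (bs.length : Int) := by push_cast; ring
        rw [h1, h2]
        simp
      rw [hcuts]
      rw [show ((0 : Int) :: (chgFrom 1 d bs ++ [1 + (bs.length : Int)])).tail
          = ((0 : Int) :: (chgFrom 1 d bs ++ [1 + (bs.length : Int)])).drop 1 from rfl]
      rw [pairSum_zip]
      rw [show (0 : Int) :: (chgFrom 1 d bs ++ [1 + (bs.length : Int)])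
          = 0 :: chgFrom 1 d bs ++ [1 + (bs.length : Int)] by simp]
      rw [pairSum_chg bs d 0 1]
      norm_num [sumRuns]

-- ===== VERDICT (by name: the statement is the Claim_ definition above) =====
theorem solve_spec : Claim_equal_solve := by
  intro n notes _ hpre
  obtain ⟨hn0, hn1⟩ := hpre
  unfold Spec_solve
  rw [solve_eq_loopA n notes hn1, solve_alt_eq n notes hn0]
  cases hU : ded (notes.take n.toNat) with
  | nil => rfl
  | cons h t =>
    show loopA h 0 0 0 t = sumRuns (zipDirs h t)
    have hch : ChainNe h t := ded_chain _ h t hU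
    rw [← loopB_start h t hch]
    have h0 : PySem.Int.floordiv (0 : Int) 4 = 0 := by decide
    have hmain := main_inv t h none 0 0 le_rfl (fun _ => rfl) hch
    rw [show (0 : Int) = 0 + PySem.Int.floordiv (0 : Int) 4 by rw [h0]; ring]
    rw [show loopA h (0 + PySem.Int.floordiv (0:Int) 4) (0 + PySem.Int.floordiv (0:Int) 4)
        (0 + PySem.Int.floordiv (0:Int) 4) t
      = loopA h (if (none : Option Bool) = some true then 0 % 4 else 0)
        (if (none : Option Bool) = some false then 0 % 4 else 0)
        (0 + PySem.Int.floordiv (0:Int) 4) t by rw [h0]; norm_num]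
    exact hmain
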